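-- pv_equiv track=rewrite | github.com/debonte/AdventOfCode | year2022/Day06.py | part2
-- ===== SOURCE A (Python) =====
-- def part2(input: str, windowSize: int) -> int:
--     letterCounts: dict[str, int] = {}
--
--     for i in range(len(input)):
--         chAdd = input[i]
--
--         if chAdd in letterCounts:
--             letterCounts[chAdd] += 1
--         else:
--             letterCounts[chAdd] = 1
--
--         if i - windowSize >= 0:
--             chRemove = input[i - windowSize]
--
--             letterCounts[chRemove] -= 1
--
--             if letterCounts[chRemove] == 0:
--                 del letterCounts[chRemove]
--
--         if len(letterCounts) == windowSize:
--             return i + 1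
--
--     return -1
-- ===== SOURCE B (Python) =====
-- def part2(input: str, windowSize: int) -> int:
--     for i in range(len(input)):
--         if len(set(input[max(0, i + 1 - windowSize):i + 1])) == windowSize:
--             return i + 1
--     return -1
-- ===== Notes on version B (the rewrite author's own statement) =====
-- stated objective: simpler
-- what changed: A maintains an incrementally updated letter-count dict across the scan; B re-derives each window afresh as a slice and tests len(set(window)) == windowSize, eliminating the dict and its add/remove/delete bookkeeping.
import Mathlib
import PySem

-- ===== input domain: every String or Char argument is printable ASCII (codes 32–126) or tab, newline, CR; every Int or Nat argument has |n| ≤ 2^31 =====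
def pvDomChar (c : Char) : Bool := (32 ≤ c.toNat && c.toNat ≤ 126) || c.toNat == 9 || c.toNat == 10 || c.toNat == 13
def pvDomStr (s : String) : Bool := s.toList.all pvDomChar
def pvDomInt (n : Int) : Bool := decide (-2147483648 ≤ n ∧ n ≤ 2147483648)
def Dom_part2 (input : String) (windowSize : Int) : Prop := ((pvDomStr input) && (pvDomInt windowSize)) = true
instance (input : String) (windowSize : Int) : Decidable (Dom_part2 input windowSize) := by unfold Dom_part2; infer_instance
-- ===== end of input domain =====

-- B replaces A's incrementally maintained letter-count dict by re-scanning each window with a fresh set (simpler, not faster).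

-- ===== PORT A =====
-- A's 'for i in range(len(input))' loop as fuel/index recursion over the same dict state.
def part2Go (chars : List Char) (w : Int) (fuel : Nat) (i : Nat) (d : PySem.Dict Char Int) : Int :=
  match fuel with
  | 0 => -1
  | Nat.succ fuel =>
    -- chAdd = input[i]; the loop only reaches i < len(input), where pyGetD is exact
    let chAdd := PySem.List.pyGetD chars (i : Int) ' '
    let d1 := if d.contains chAdd then d.modify chAdd 0 (· + 1) else d.insert chAdd 1
    let d2 :=
      if (i : Int) - w ≥ 0 then
        -- chRemove = input[i - windowSize]; in range under Pre_ (0 ≤ windowSize), where pyGetD is exact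
        let chRemove := PySem.List.pyGetD chars ((i : Int) - w) ' '
        let d' := d1.modify chRemove 0 (· - 1)
        if d'.getD chRemove 0 = 0 then d'.erase chRemove else d'
      else d1
    if (d2.size : Int) = w then (i : Int) + 1 else part2Go chars w fuel (i + 1) d2

def part2 (input : String) (windowSize : Int) : Int :=
  part2Go input.toList windowSize input.toList.length 0 PySem.Dict.empty

-- ===== PORT B =====
def part2AltGo (chars : List Char) (w : Int) (fuel : Nat) (i : Nat) : Int :=
  match fuel with
  | 0 => -1
  | Nat.succ fuel =>
    let window := PySem.List.slice chars (some (max 0 ((i : Int) + 1 - w))) (some ((i : Int) + 1))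
    if ((PySem.Set.ofList window).length : Int) = w then (i : Int) + 1
    else part2AltGo chars w fuel (i + 1)

def part2_alt (input : String) (windowSize : Int) : Int :=
  part2AltGo input.toList windowSize input.toList.length 0

-- ===== PRECONDITION & SPEC =====
-- Pre_ excludes only windowSize < 0 on nonempty input, where A raises (KeyError/IndexError at input[i - windowSize]).
def Pre_part2 (input : String) (windowSize : Int) : Prop := 0 ≤ windowSize ∨ input = ""
instance (input : String) (windowSize : Int) : Decidable (Pre_part2 input windowSize) := by
  unfold Pre_part2; infer_instance

def pvWitness_part2 : String × Int := ("zcfzfwzzqfrljwzlrfnpqdbhtmscgvjw", 4)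

def Spec_part2 (input : String) (windowSize : Int) (out : Int) : Prop := out = part2_alt input windowSize
instance (input : String) (windowSize : Int) (out : Int) : Decidable (Spec_part2 input windowSize out) := by
  unfold Spec_part2; infer_instance

-- ===== CLAIM (what is proved, stated in full; the proofs are below) =====
def Claim_equal_part2 : Prop := ∀ (input : String) (windowSize : Int), Dom_part2 input windowSize → Pre_part2 input windowSize → Spec_part2 input windowSize (part2 input windowSize)


-- ===== LEMMAS AND PROOFS =====

-- d is exactly the letter-count dict of the list l: unique keys, counts agree, no stale (zero-count) keys.
def IsCounter (l : List Char) (d : PySem.Dict Char Int) : Prop :=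
  d.keys.Nodup ∧ (∀ c, d.getD c 0 = (l.count c : Int)) ∧ (∀ c, d.contains c = true → c ∈ l)

theorem isCounter_empty : IsCounter [] (PySem.Dict.empty : PySem.Dict Char Int) := by
  refine ⟨by simp [PySem.Dict.keys_empty], fun c => by simp [PySem.Dict.getD_empty], fun c h => ?_⟩
  simp [PySem.Dict.contains_empty] at h

theorem contains_of_getD_ne {d : PySem.Dict Char Int} {c : Char}
    (h : d.getD c 0 ≠ 0) : d.contains c = true := by
  rw [PySem.Dict.contains_eq_isSome_get?]
  rw [PySem.Dict.getD_eq_get?_getD] at h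
  cases hg : d.get? c with
  | none => rw [hg] at h; simp at h
  | some v => simp

theorem mem_keys_iff_of_isCounter {l : List Char} {d : PySem.Dict Char Int}
    (h : IsCounter l d) (c : Char) : c ∈ d.keys ↔ c ∈ l := by
  obtain ⟨-, hcnt, hmem⟩ := h
  rw [← PySem.Dict.contains_iff_mem_keys]
  constructor
  · exact hmem c
  · intro hc
    apply contains_of_getD_ne
    rw [hcnt c]
    have : 0 < l.count c := List.count_pos_iff.mpr hc
    omega

theorem size_eq_of_isCounter {l : List Char} {d : PySem.Dict Char Int}
    (h : IsCounter l d) : d.size = (PySem.Set.ofList l).length := by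
  have hperm : d.keys.Perm (PySem.Set.ofList l) := by
    rw [List.perm_ext_iff_of_nodup h.1 (PySem.Set.nodup_ofList l)]
    intro c
    rw [mem_keys_iff_of_isCounter h c, PySem.Set.mem_ofList]
  have : d.keys.length = (PySem.Set.ofList l).length := hperm.length_eq
  simpa [PySem.Dict.keys, PySem.Dict.size] using this

-- the add step (both branches of A's first if are an insert of count+1)
theorem step_add_eq (d : PySem.Dict Char Int) (c : Char) :
    (if d.contains c then d.modify c 0 (· + 1) else d.insert c 1) =
      d.insert c (d.getD c 0 + 1) := by
  by_cases h : d.contains c = true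
  · simp [h, PySem.Dict.modify]
  · have h' : d.contains c = false := by simpa using h
    rw [PySem.Dict.getD_of_not_contains d 0 h']
    simp [h']

theorem isCounter_add {l : List Char} {d : PySem.Dict Char Int} (h : IsCounter l d) (c : Char) :
    IsCounter (l ++ [c]) (if d.contains c then d.modify c 0 (· + 1) else d.insert c 1) := by
  rw [step_add_eq]
  obtain ⟨hnd, hcnt, hmem⟩ := h
  refine ⟨PySem.Dict.nodup_keys_insert d c _ hnd, fun c' => ?_, fun c' hc' => ?_⟩
  · rw [PySem.Dict.getD_insert]
    by_cases hcc : c' = c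
    · subst hcc; simp [hcnt c']
    · rw [if_neg hcc, hcnt c', List.count_append]
      have : List.count c' [c] = 0 := List.count_eq_zero.mpr (by simp [hcc])
      omega
  · rw [PySem.Dict.contains_insert] at hc'
    rcases (Bool.or_eq_true _ _).mp hc' with h1 | h1
    · have : c' = c := by simpa using h1
      subst this; simp
    · exact List.mem_append_left _ (hmem c' h1)

-- erase lemmas (PySem.Dict.erase is a filter on the items list)
theorem find?_filter_ne_key (items : List (Char × Int)) (k c : Char) (h : c ≠ k) :
    List.find? (fun p => p.1 == c) (items.filter (fun p => !(p.1 == k)))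
      = List.find? (fun p => p.1 == c) items := by
  induction items with
  | nil => rfl
  | cons p rest ih =>
    simp only [List.filter_cons, List.find?_cons]
    by_cases hpk : (p.1 == k) = true
    · have h2 : (p.1 == c) = false :=
        beq_eq_false_iff_ne.mpr (by rw [eq_of_beq hpk]; exact fun he => h he.symm)
      simp [hpk, h2, ih]
    · have hpk' : (p.1 == k) = false := by simpa using hpk
      simp only [hpk', Bool.not_false, if_true, List.find?_cons]
      by_cases hpc : (p.1 == c) = true
      · simp [hpc]
      · have hpc' : (p.1 == c) = false := by simpa using hpc
        simp [hpc', ih]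

theorem find?_filter_self_key (items : List (Char × Int)) (k : Char) :
    List.find? (fun p => p.1 == k) (items.filter (fun p => !(p.1 == k))) = none := by
  induction items with
  | nil => rfl
  | cons p rest ih =>
    simp only [List.filter_cons]
    by_cases hpk : (p.1 == k) = true
    · simpa [hpk] using ih
    · have hpk' : (p.1 == k) = false := by simpa using hpk
      simp [hpk', List.find?_cons, ih]

theorem get?_erase (d : PySem.Dict Char Int) (k c : Char) :
    (d.erase k).get? c = if c = k then none else d.get? c := by
  by_cases hck : c = k
  · subst hck
    rw [if_pos rfl]
    simp only [PySem.Dict.erase, PySem.Dict.get?]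
    rw [find?_filter_self_key]
    rfl
  · rw [if_neg hck]
    simp only [PySem.Dict.erase, PySem.Dict.get?]
    rw [find?_filter_ne_key _ _ _ hck]

theorem getD_erase (d : PySem.Dict Char Int) (k c : Char) (d0 : Int) :
    (d.erase k).getD c d0 = if c = k then d0 else d.getD c d0 := by
  rw [PySem.Dict.getD_eq_get?_getD, PySem.Dict.getD_eq_get?_getD, get?_erase]
  by_cases h : c = k <;> simp [h]

theorem contains_erase (d : PySem.Dict Char Int) (k c : Char) :
    (d.erase k).contains c = if c = k then false else d.contains c := by
  rw [PySem.Dict.contains_eq_isSome_get?, PySem.Dict.contains_eq_isSome_get?, get?_erase]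
  by_cases h : c = k <;> simp [h]

theorem nodup_keys_erase (d : PySem.Dict Char Int) (k : Char) (h : d.keys.Nodup) :
    (d.erase k).keys.Nodup := by
  have hsub : (d.erase k).keys.Sublist d.keys := by
    simp only [PySem.Dict.keys, PySem.Dict.erase]
    exact List.Sublist.map _ List.filter_sublist
  exact h.sublist hsub

-- the remove step of A, applied to the counter of x :: l, yields the counter of l
theorem isCounter_remove {l : List Char} {d : PySem.Dict Char Int} {x : Char}
    (h : IsCounter (x :: l) d) :
    IsCounter l
      (let d' := d.modify x 0 (· - 1);
       if d'.getD x 0 = 0 then d'.erase x else d') := by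
  obtain ⟨hnd, hcnt, hmem⟩ := h
  have hdx : d.getD x 0 = (l.count x : Int) + 1 := by rw [hcnt x, List.count_cons_self]; push_cast; ring
  have hmod : d.modify x 0 (· - 1) = d.insert x (l.count x : Int) := by
    simp [PySem.Dict.modify, hdx]
  simp only [hmod]
  have hget : (d.insert x (l.count x : Int)).getD x 0 = (l.count x : Int) :=
    PySem.Dict.getD_insert_self d x _ 0
  by_cases hz : (l.count x : Int) = 0
  · -- count l x = 0: the key is erased
    rw [if_pos (by rw [hget, hz])]
    refine ⟨nodup_keys_erase _ x (PySem.Dict.nodup_keys_insert d x _ hnd), fun c => ?_,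
      fun c hc => ?_⟩
    · by_cases hcx : c = x
      · subst hcx; rw [getD_erase, if_pos rfl]; omega
      · rw [getD_erase, if_neg hcx, PySem.Dict.getD_insert, if_neg hcx, hcnt c]
        simp [List.count_cons]
        exact fun he => hcx he.symm
    · rw [contains_erase] at hc
      by_cases hcx : c = x
      · simp [hcx] at hc
      · rw [if_neg hcx, PySem.Dict.contains_insert] at hc
        rcases (Bool.or_eq_true _ _).mp hc with h1 | h1
        · exact absurd (by simpa using h1) hcx
        · rcases List.mem_cons.mp (hmem c h1) with h2 | h2
          · exact absurd h2 hcx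
          · exact h2
  · -- count l x ≠ 0: key stays with the decremented value
    rw [if_neg (by rw [hget]; exact hz)]
    refine ⟨PySem.Dict.nodup_keys_insert d x _ hnd, fun c => ?_, fun c hc => ?_⟩
    · rw [PySem.Dict.getD_insert]
      by_cases hcx : c = x
      · subst hcx; rw [if_pos rfl]
      · rw [if_neg hcx, hcnt c]
        simp [List.count_cons]
        exact fun he => hcx he.symm
    · by_cases hcx : c = x
      · subst hcx
        have : 0 < l.count c := by omega
        exact List.count_pos_iff.mp this
      · rw [PySem.Dict.contains_insert] at hc
        rcases (Bool.or_eq_true _ _).mp hc with h1 | h1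
        · exact absurd (by simpa using h1) hcx
        · rcases List.mem_cons.mp (hmem c h1) with h2 | h2
          · exact absurd h2 hcx
          · exact h2

-- main loop correspondence: d holds the counts of the window ending just before index i
theorem go_eq (chars : List Char) (wn : Nat) :
    ∀ (fuel i : Nat) (d : PySem.Dict Char Int), i + fuel = chars.length →
      IsCounter ((chars.take i).drop (i - wn)) d →
      part2Go chars (wn : Int) fuel i d = part2AltGo chars (wn : Int) fuel i := by
  intro fuel
  induction fuel with
  | zero => intro i d _ _; rfl
  | succ fuel ih =>
    intro i d hlen hinv
    have hi : i < chars.length := by omega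
    rw [part2Go, part2AltGo]
    have hadd : PySem.List.pyGetD chars (i : Int) ' ' = chars[i] := by
      rw [PySem.List.pyGetD_natCast]
      simp [List.getD_eq_getElem?_getD, hi]
    -- the dict after both updates is the counter of the new window
    have htake : chars.take (i + 1) = chars.take i ++ [chars[i]] := by
      rw [List.take_add_one]
      simp [hi]
    have hinv2 : IsCounter ((chars.take (i + 1)).drop ((i + 1) - wn))
        (if ((i : Int)) - (wn : Int) ≥ 0 then
           let chRemove := PySem.List.pyGetD chars ((i : Int) - (wn : Int)) ' '
           let d' := (if d.contains (PySem.List.pyGetD chars (i : Int) ' ')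
                        then d.modify (PySem.List.pyGetD chars (i : Int) ' ') 0 (· + 1)
                        else d.insert (PySem.List.pyGetD chars (i : Int) ' ') 1).modify chRemove 0 (· - 1)
           if d'.getD chRemove 0 = 0 then d'.erase chRemove else d'
         else (if d.contains (PySem.List.pyGetD chars (i : Int) ' ')
                 then d.modify (PySem.List.pyGetD chars (i : Int) ' ') 0 (· + 1)
                 else d.insert (PySem.List.pyGetD chars (i : Int) ' ') 1)) := by
      rw [hadd]
      have hmid : IsCounter ((chars.take i).drop (i - wn) ++ [chars[i]])
          (if d.contains chars[i] then d.modify chars[i] 0 (· + 1) else d.insert chars[i] 1) :=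
        isCounter_add hinv chars[i]
      have hmid' : (chars.take i).drop (i - wn) ++ [chars[i]] = (chars.take (i + 1)).drop (i - wn) := by
        rw [htake, List.drop_append_of_le_length (by simp [List.length_take]; omega)]
      rw [hmid'] at hmid
      by_cases hw : wn ≤ i
      · have hge : ((i : Int)) - (wn : Int) ≥ 0 := by omega
        rw [if_pos hge]
        have hidx : ((i : Int)) - (wn : Int) = ((i - wn : Nat) : Int) := by omega
        have hrm : PySem.List.pyGetD chars ((i : Int) - (wn : Int)) ' ' = chars[i - wn] := by
          rw [hidx, PySem.List.pyGetD_natCast]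
          have : i - wn < chars.length := by omega
          simp [List.getD_eq_getElem?_getD, this]
        rw [hrm]
        have hlt : i - wn < (chars.take (i + 1)).length := by
          simp [List.length_take]
          omega
        have hcons : (chars.take (i + 1)).drop (i - wn)
            = chars[i - wn] :: (chars.take (i + 1)).drop (i - wn + 1) := by
          rw [List.drop_eq_getElem_cons hlt]
          congr 1
          rw [List.getElem_take]
        rw [hcons] at hmid
        have := isCounter_remove hmid
        have harith : (i + 1) - wn = (i - wn) + 1 := by omega
        rw [harith]
        exact this
      · have hlt' : ¬ (((i : Int)) - (wn : Int) ≥ 0) := by omega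
        rw [if_neg hlt']
        have h1 : i - wn = 0 := by omega
        have h2 : (i + 1) - wn = 0 := by omega
        rw [h2]
        rw [h1] at hmid
        exact hmid
    -- B's window slice is the same list
    have hwin : PySem.List.slice chars (some (max 0 ((i : Int) + 1 - (wn : Int)))) (some ((i : Int) + 1))
        = (chars.take (i + 1)).drop ((i + 1) - wn) := by
      have hmax : max 0 ((i : Int) + 1 - (wn : Int)) = (((i + 1) - wn : Nat) : Int) := by omega
      have hcast : ((i : Int) + 1) = (((i + 1 : Nat)) : Int) := by omega
      rw [hmax, hcast, PySem.List.slice_natCast, ← List.drop_take]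
    rw [hwin] at *
    have hsize := size_eq_of_isCounter hinv2
    by_cases htest : ((PySem.Set.ofList ((chars.take (i + 1)).drop ((i + 1) - wn))).length : Int) = (wn : Int)
    · rw [if_pos (by rw [hsize]; exact htest), if_pos htest]
    · rw [if_neg (by rw [hsize]; exact htest), if_neg htest]
      exact ih (i + 1) _ (by omega) hinv2

-- ===== VERDICT (by name: the statement is the Claim_ definition above) =====
theorem part2_spec : Claim_equal_part2 := by
  intro input windowSize _ hpre
  unfold Spec_part2 part2 part2_alt
  rcases hpre with hw | hempty
  · obtain ⟨wn, rfl⟩ : ∃ wn : Nat, windowSize = (wn : Int) :=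
      ⟨windowSize.toNat, (Int.toNat_of_nonneg hw).symm⟩
    exact go_eq input.toList wn input.toList.length 0 PySem.Dict.empty (by omega)
      (by simpa using isCounter_empty)
  · subst hempty
    rfl
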